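-- pv_equiv track=rewrite | github.com/ediree0/ctfmn | crypto/xor-without-x/solve.py | decrypt_flag
-- ===== SOURCE A (Python) =====
-- def decrypt_flag(keys, encrypted_flags):
--     """
--     Decrypt the flag using multiple encrypted versions with different keys.
--
--     Args:
--         keys: List of keys in hex format
--         encrypted_flags: List of encrypted flags in hex format
--
--     Returns:
--         The decrypted flag
--     """
--     # Convert hex strings to byte arrays
--     byte_keys = [bytes.fromhex(key) for key in keys]
--     byte_encrypted = [bytes.fromhex(enc) for enc in encrypted_flags]
--
--     # Find the length of the encrypted flag (should be same across all encryptions)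
--     flag_length = len(byte_encrypted[0])
--
--     # Initialize result array with all bits set to 1
--     possible_flag = [0xFF] * flag_length
--
--     # For each encryption and key pair
--     for i in range(len(byte_keys)):
--         key = byte_keys[i]
--         encrypted = byte_encrypted[i]
--
--         # For each byte in the encrypted flag
--         for j in range(flag_length):
--             key_byte = key[j % len(key)]
--
--             # If a bit is 0 in the encrypted byte, then it must be 0 in the original flag
--             # This is because OR operation with any key bit would have made it 1 otherwise
--             # ~encrypted[j] gives us a mask where 1 represents positions where encrypted has 0
--             # & operation with current possible_flag eliminates possibilities
--             possible_flag[j] &= ~(~encrypted[j] & ~key_byte)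
--
--     # Convert bytes to ASCII characters
--     flag = ''.join(chr(b) for b in possible_flag)
--     return flag
--
-- keys = [
--     # Add the 10 keys here
-- ]
--
-- encrypted_flags = [
--     # Add the 10 encrypted flags here
-- ]
-- ===== SOURCE B (Python) =====
-- def decrypt_flag(keys, encrypted_flags):
--     """Big-integer reformulation: each byte of the flag is the AND over all pairs
--     of (encrypted_byte | extended_key_byte), so OR each encrypted flag with its
--     cyclically extended key as one big integer and AND the results together."""
--     byte_encrypted = [bytes.fromhex(enc) for enc in encrypted_flags]
--     flag_length = len(byte_encrypted[0])
--     acc = (1 << (8 * flag_length)) - 1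
--     for i in range(len(keys)):
--         key = bytes.fromhex(keys[i])
--         encrypted = byte_encrypted[i][:flag_length]
--         extended = bytes(key[j % len(key)] for j in range(flag_length))
--         acc &= int.from_bytes(encrypted, 'big') | int.from_bytes(extended, 'big')
--     return ''.join(chr(b) for b in acc.to_bytes(flag_length, 'big'))
-- ===== Notes on version B (the rewrite author's own statement) =====
-- stated objective: alternative
-- what changed: Replaces the per-byte nested loops mutating a list with whole-flag big-integer arithmetic: each encrypted flag is ORed with its cyclically extended key as one int.from_bytes integer, the results are ANDed into an all-ones integer, and the flag is recovered with to_bytes.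
import Mathlib
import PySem

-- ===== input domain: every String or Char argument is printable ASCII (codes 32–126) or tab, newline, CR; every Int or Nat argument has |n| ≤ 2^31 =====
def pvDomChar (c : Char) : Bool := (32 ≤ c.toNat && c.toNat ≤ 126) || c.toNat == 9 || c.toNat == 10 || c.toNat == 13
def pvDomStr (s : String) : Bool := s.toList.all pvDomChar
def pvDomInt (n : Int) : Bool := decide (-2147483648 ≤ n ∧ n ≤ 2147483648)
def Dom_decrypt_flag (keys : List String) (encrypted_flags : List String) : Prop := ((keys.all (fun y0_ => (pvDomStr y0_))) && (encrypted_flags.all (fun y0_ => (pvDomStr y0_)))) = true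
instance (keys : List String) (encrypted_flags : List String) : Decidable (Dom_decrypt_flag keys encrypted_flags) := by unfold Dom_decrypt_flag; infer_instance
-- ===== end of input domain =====

-- B recomputes the flag with whole-flag big integers (one OR per key/flag pair, one AND to
-- accumulate) instead of A's per-byte nested loops.

-- ===== SHARED HELPER: bytes.fromhex =====
-- Exact port of Python's bytes.fromhex on the stated ASCII domain: ASCII whitespace is
-- allowed before/after/between byte pairs (not inside a pair); none = ValueError.
def pyHexDigit? (c : Char) : Option Nat :=
  if '0' ≤ c ∧ c ≤ '9' then some (c.toNat - 48)
  else if 'a' ≤ c ∧ c ≤ 'f' then some (c.toNat - 87)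
  else if 'A' ≤ c ∧ c ≤ 'F' then some (c.toNat - 55)
  else none

def pyHexWs (c : Char) : Bool :=
  c.toNat == 32 || c.toNat == 9 || c.toNat == 10 || c.toNat == 11 || c.toNat == 12 || c.toNat == 13

def pyFromhexAux : List Char → Option (List Nat)
  | [] => some []
  | c :: cs =>
    if pyHexWs c then pyFromhexAux cs
    else
      match cs with
      | [] => none
      | d :: cs' =>
        match pyHexDigit? c, pyHexDigit? d with
        | some h, some l => (pyFromhexAux cs').map (fun bs => (16 * h + l) :: bs)
        | _, _ => none

def pyFromhex? (s : String) : Option (List Nat) := pyFromhexAux s.toList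

-- ===== PORT A =====
-- Transliteration of A. Python bytes become `List Nat` of byte values; bytes.fromhex is
-- pyFromhex? (Pre_ guarantees `some`, so `.getD []` is never the defaulted case);
-- `possible_flag` holds Python ints, so it is a `List Int` and Python's `~`/`&` are
-- Int.lnot/Int.land (exact on all Python ints); every index is in range under Pre_, so
-- List.getD matches Python indexing; chr(b) = Char.ofNat b.toNat (0 ≤ b < 256 under Pre_).
def decrypt_flag (keys : List String) (encrypted_flags : List String) : String :=
  let byte_keys := keys.map (fun key => (pyFromhex? key).getD [])
  let byte_encrypted := encrypted_flags.map (fun enc => (pyFromhex? enc).getD [])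
  let flag_length := (byte_encrypted.headD []).length
  let possible_flag : List Int := List.replicate flag_length 255
  let possible_flag := (List.range byte_keys.length).foldl (fun pf i =>
    let key := byte_keys.getD i []
    let encrypted := byte_encrypted.getD i []
    (List.range flag_length).foldl (fun pf j =>
      let key_byte : Int := (key.getD (j % key.length) 0 : Nat)
      pf.set j (Int.land (pf.getD j 0)
        (Int.lnot (Int.land (Int.lnot ((encrypted.getD j 0 : Nat) : Int)) (Int.lnot key_byte))))) pf) possible_flag
  String.ofList (possible_flag.map (fun b => Char.ofNat b.toNat))

-- ===== PORT B =====
-- int.from_bytes(bs, 'big')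
def pyFromBytesBig (bs : List Nat) : Nat := bs.foldl (fun a b => a * 256 + b) 0

-- x.to_bytes(n, 'big')  (exact for x < 256^n, which always holds here)
def pyToBytesBig : Nat → Nat → List Nat
  | 0, _ => []
  | n + 1, x => x / 256 ^ n :: pyToBytesBig n (x % 256 ^ n)

def decrypt_flag_alt (keys : List String) (encrypted_flags : List String) : String :=
  let byte_encrypted := encrypted_flags.map (fun enc => (pyFromhex? enc).getD [])
  let flag_length := (byte_encrypted.headD []).length
  let acc0 : Nat := 2 ^ (8 * flag_length) - 1
  let acc := (List.range keys.length).foldl (fun acc i =>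
    let key := (pyFromhex? (keys.getD i "")).getD []
    let encrypted := (byte_encrypted.getD i []).take flag_length
    let extended := (List.range flag_length).map (fun j => key.getD (j % key.length) 0)
    Nat.land acc (Nat.lor (pyFromBytesBig encrypted) (pyFromBytesBig extended))) acc0
  String.ofList ((pyToBytesBig flag_length acc).map Char.ofNat)

-- ===== PRECONDITION & SPEC =====
-- A string is acceptable to bytes.fromhex iff every whitespace-delimited run of characters
-- has even length and consists of hex digits (pairs cannot span or contain whitespace);
-- its byte count is then half its number of non-whitespace characters.
def pvHexOk (s : String) : Prop :=
  (s.toList.splitOnP pyHexWs).all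
    (fun t => t.length % 2 == 0 && t.all (fun c => (pyHexDigit? c).isSome)) = true

def pvHexCount (s : String) : Nat := (s.toList.countP (fun c => !pyHexWs c)) / 2

-- Pre_ = exactly the inputs where Python A returns: every string is valid hex (else
-- ValueError), encrypted_flags is nonempty and at least as long as keys (else IndexError),
-- and — when the first flag is nonempty — every key is nonempty (else ZeroDivisionError) and
-- each of the first keys.length encrypted flags is at least as long as the first (else IndexError).
def Pre_decrypt_flag (keys : List String) (encrypted_flags : List String) : Prop :=
  (∀ s ∈ keys, pvHexOk s) ∧ (∀ s ∈ encrypted_flags, pvHexOk s) ∧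
  encrypted_flags ≠ [] ∧ keys.length ≤ encrypted_flags.length ∧
  (0 < pvHexCount (encrypted_flags.headD "") →
    (∀ s ∈ keys, 0 < pvHexCount s) ∧
    (∀ i < keys.length,
      pvHexCount (encrypted_flags.headD "") ≤ pvHexCount (encrypted_flags.getD i "")))
instance (keys : List String) (encrypted_flags : List String) : Decidable (Pre_decrypt_flag keys encrypted_flags) := by unfold Pre_decrypt_flag pvHexOk; infer_instance

def pvWitness_decrypt_flag : List String × List String := (["0f 10", "Ff"], ["3D2e", "7bA9"])

def Spec_decrypt_flag (keys : List String) (encrypted_flags : List String) (out : String) : Prop := out = decrypt_flag_alt keys encrypted_flags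
instance (keys : List String) (encrypted_flags : List String) (out : String) : Decidable (Spec_decrypt_flag keys encrypted_flags out) := by unfold Spec_decrypt_flag; infer_instance

-- ===== CLAIM (what is proved, stated in full; the proofs are below) =====
def Claim_equal_decrypt_flag : Prop := ∀ (keys : List String) (encrypted_flags : List String), Dom_decrypt_flag keys encrypted_flags → Pre_decrypt_flag keys encrypted_flags → Spec_decrypt_flag keys encrypted_flags (decrypt_flag keys encrypted_flags)

-- ===== LEMMAS AND PROOFS =====

theorem pv_witness_ok : Dom_decrypt_flag pvWitness_decrypt_flag.1 pvWitness_decrypt_flag.2 ∧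
    Pre_decrypt_flag pvWitness_decrypt_flag.1 pvWitness_decrypt_flag.2 := by decide

-- Python's  p & ~(~e & ~k)  on nonnegative ints, pushed to Nat:  p &&& (e ||| k)
theorem int_step_eq (p e k : Nat) :
    Int.land (p : Int) (Int.lnot (Int.land (Int.lnot (e : Int)) (Int.lnot (k : Int)))) =
      ((Nat.land p (Nat.lor e k) : Nat) : Int) := rfl

theorem fbb_aux (bs : List Nat) : ∀ a : Nat, bs.foldl (fun a b => a * 256 + b) a = a * 256 ^ bs.length + pyFromBytesBig bs := by
  induction bs with
  | nil => intro a; simp [pyFromBytesBig]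
  | cons b bs ih =>
    intro a
    simp only [List.foldl_cons, List.length_cons, pyFromBytesBig] at *
    rw [ih (a * 256 + b), ih (0 * 256 + b)]
    ring

theorem bytesToNat_cons (b : Nat) (bs : List Nat) :
    pyFromBytesBig (b :: bs) = b * 256 ^ bs.length + pyFromBytesBig bs := by
  show (b :: bs).foldl (fun a b => a * 256 + b) 0 = _
  simp only [List.foldl_cons]
  rw [fbb_aux bs (0 * 256 + b)]
  ring_nf

theorem bytesToNat_lt (bs : List Nat) (h : ∀ b ∈ bs, b < 256) :
    pyFromBytesBig bs < 256 ^ bs.length := by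
  induction bs with
  | nil => simp [pyFromBytesBig]
  | cons b bs ih =>
    rw [bytesToNat_cons]
    have hb : b < 256 := h b (by simp)
    have ht := ih (fun x hx => h x (by simp [hx]))
    have : (b + 1) * 256 ^ bs.length ≤ 256 ^ (bs.length + 1) := by
      rw [pow_succ, mul_comm (256 ^ bs.length) 256]
      exact Nat.mul_le_mul_right _ (by omega)
    simp only [List.length_cons]
    calc b * 256 ^ bs.length + pyFromBytesBig bs < b * 256 ^ bs.length + 256 ^ bs.length :=
      Nat.add_lt_add_left ht _
    _ = (b + 1) * 256 ^ bs.length := by ring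
    _ ≤ 256 ^ (bs.length + 1) := this

theorem land_block (k a b r s : Nat) (hr : r < 2 ^ k) (hs : s < 2 ^ k) :
    Nat.land (a * 2 ^ k + r) (b * 2 ^ k + s) = Nat.land a b * 2 ^ k + Nat.land r s := by
  have hrs : r &&& s < 2 ^ k := Nat.and_lt_two_pow _ hs
  show (a * 2 ^ k + r) &&& (b * 2 ^ k + s) = (a &&& b) * 2 ^ k + (r &&& s)
  apply Nat.eq_of_testBit_eq
  intro i
  rw [mul_comm a, mul_comm b, mul_comm (a &&& b)]
  rw [Nat.testBit_and, Nat.testBit_two_pow_mul_add _ hr, Nat.testBit_two_pow_mul_add _ hs,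
      Nat.testBit_two_pow_mul_add _ hrs]
  split_ifs <;> simp [Nat.testBit_and]

theorem lor_block (k a b r s : Nat) (hr : r < 2 ^ k) (hs : s < 2 ^ k) :
    Nat.lor (a * 2 ^ k + r) (b * 2 ^ k + s) = Nat.lor a b * 2 ^ k + Nat.lor r s := by
  have hrs : r ||| s < 2 ^ k := Nat.or_lt_two_pow hr hs
  show (a * 2 ^ k + r) ||| (b * 2 ^ k + s) = (a ||| b) * 2 ^ k + (r ||| s)
  apply Nat.eq_of_testBit_eq
  intro i
  rw [mul_comm a, mul_comm b, mul_comm (a ||| b)]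
  rw [Nat.testBit_or, Nat.testBit_two_pow_mul_add _ hr, Nat.testBit_two_pow_mul_add _ hs,
      Nat.testBit_two_pow_mul_add _ hrs]
  split_ifs <;> simp [Nat.testBit_or]

theorem pow256 (n : Nat) : (256 : Nat) ^ n = 2 ^ (8 * n) := by
  rw [show (256:Nat) = 2 ^ 8 from rfl, ← pow_mul]

theorem bytesToNat_zipWith_land (xs : List Nat) : ∀ ys : List Nat, xs.length = ys.length →
    (∀ b ∈ xs, b < 256) → (∀ b ∈ ys, b < 256) →
    pyFromBytesBig (List.zipWith Nat.land xs ys) = Nat.land (pyFromBytesBig xs) (pyFromBytesBig ys) := by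
  induction xs with
  | nil => intro ys h _ _; rw [List.length_eq_zero_iff.mp h.symm]; rfl
  | cons x xs ih =>
    intro ys h hx hy
    cases ys with
    | nil => simp at h
    | cons y ys =>
      simp only [List.zipWith_cons_cons]
      rw [bytesToNat_cons, bytesToNat_cons, bytesToNat_cons]
      have hlen : xs.length = ys.length := by simpa using h
      have hzw : (List.zipWith Nat.land xs ys).length = xs.length := by simp [hlen]
      have bx := bytesToNat_lt xs (fun b hb => hx b (by simp [hb]))
      have by' := bytesToNat_lt ys (fun b hb => hy b (by simp [hb]))
      rw [pow256] at bx
      rw [pow256, ← hlen] at by'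
      rw [hzw, ih ys hlen (fun b hb => hx b (by simp [hb])) (fun b hb => hy b (by simp [hb])),
          ← hlen, pow256]
      exact (land_block (8 * xs.length) x y _ _ bx by').symm

theorem bytesToNat_zipWith_lor (xs : List Nat) : ∀ ys : List Nat, xs.length = ys.length →
    (∀ b ∈ xs, b < 256) → (∀ b ∈ ys, b < 256) →
    pyFromBytesBig (List.zipWith Nat.lor xs ys) = Nat.lor (pyFromBytesBig xs) (pyFromBytesBig ys) := by
  induction xs with
  | nil => intro ys h _ _; rw [List.length_eq_zero_iff.mp h.symm]; rfl
  | cons x xs ih =>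
    intro ys h hx hy
    cases ys with
    | nil => simp at h
    | cons y ys =>
      simp only [List.zipWith_cons_cons]
      rw [bytesToNat_cons, bytesToNat_cons, bytesToNat_cons]
      have hlen : xs.length = ys.length := by simpa using h
      have hzw : (List.zipWith Nat.lor xs ys).length = xs.length := by simp [hlen]
      have bx := bytesToNat_lt xs (fun b hb => hx b (by simp [hb]))
      have by' := bytesToNat_lt ys (fun b hb => hy b (by simp [hb]))
      rw [pow256] at bx
      rw [pow256, ← hlen] at by'
      rw [hzw, ih ys hlen (fun b hb => hx b (by simp [hb])) (fun b hb => hy b (by simp [hb])),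
          ← hlen, pow256]
      exact (lor_block (8 * xs.length) x y _ _ bx by').symm

theorem bytesToNat_replicate_255 (n : Nat) :
    pyFromBytesBig (List.replicate n 255) = 2 ^ (8 * n) - 1 := by
  induction n with
  | zero => simp [pyFromBytesBig]
  | succ n ih =>
    rw [List.replicate_succ, bytesToNat_cons, List.length_replicate, ih]
    have h1 : 1 ≤ 2 ^ (8 * n) := Nat.one_le_two_pow
    have h2 : 2 ^ (8 * (n + 1)) = 256 * 2 ^ (8 * n) := by
      rw [Nat.mul_succ, pow_add]; ring
    rw [pow256]; omega

theorem toBytes_bytesToNat (bs : List Nat) (h : ∀ b ∈ bs, b < 256) :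
    pyToBytesBig bs.length (pyFromBytesBig bs) = bs := by
  induction bs with
  | nil => rfl
  | cons b bs ih =>
    have ht : pyFromBytesBig bs < 256 ^ bs.length := bytesToNat_lt bs (fun x hx => h x (by simp [hx]))
    have hp : 0 < (256:Nat) ^ bs.length := Nat.pow_pos (by norm_num)
    simp only [List.length_cons, pyToBytesBig, bytesToNat_cons]
    have hd : (b * 256 ^ bs.length + pyFromBytesBig bs) / 256 ^ bs.length = b := by
      rw [add_comm, Nat.add_mul_div_right _ _ hp, Nat.div_eq_of_lt ht]; omega
    have hm : (b * 256 ^ bs.length + pyFromBytesBig bs) % 256 ^ bs.length = pyFromBytesBig bs := by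
      rw [add_comm, Nat.add_mul_mod_self_right]
      exact Nat.mod_eq_of_lt ht
    rw [hd, hm, ih (fun x hx => h x (by simp [hx]))]

theorem Char_toNat_le_of_le {a b : Char} (h : a ≤ b) : a.toNat ≤ b.toNat := by
  simpa [Char.le_def, UInt32.le_iff_toNat_le] using h

theorem hexDigit_lt (c : Char) (h : Nat) (hh : pyHexDigit? c = some h) : h < 16 := by
  unfold pyHexDigit? at hh
  split_ifs at hh with h1 h2 h3 <;> simp only [Option.some.injEq] at hh <;> subst hh
  · have : c.toNat ≤ '9'.toNat := Char_toNat_le_of_le h1.2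
    have hv : ('9':Char).toNat = 57 := rfl
    omega
  · have : c.toNat ≤ 'f'.toNat := Char_toNat_le_of_le h2.2
    have hv : ('f':Char).toNat = 102 := rfl
    omega
  · have : c.toNat ≤ 'F'.toNat := Char_toNat_le_of_le h3.2
    have hv : ('F':Char).toNat = 70 := rfl
    omega

theorem fromhex_bytes_lt : ∀ (cs : List Char) (bs : List Nat), pyFromhexAux cs = some bs → ∀ b ∈ bs, b < 256 := by
  intro cs
  fun_induction pyFromhexAux cs with
  | case1 => intro bs h b hb; simp at h; subst h; simp at hb
  | case2 _ _ _ ih => exact ih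
  | case3 => intro bs h; simp at h
  | case4 c hnws d cs' hv lv hdeq hceq ih =>
    intro bs hbs b hb
    simp only [Option.map_eq_some_iff] at hbs
    obtain ⟨bs', hbs', rfl⟩ := hbs
    rcases List.mem_cons.mp hb with rfl | hmem
    · have := hexDigit_lt c _ hceq
      have := hexDigit_lt d _ hdeq
      omega
    · exact ih bs' hbs' b hmem
  | case5 => intro bs h; simp at h

theorem foldl_set_range {α : Type} (g : Nat → α → α) (d : α) :
    ∀ (n : Nat) (l : List α), n ≤ l.length →
    (List.range n).foldl (fun pf j => pf.set j (g j (pf.getD j d))) l =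
      ((List.range n).map (fun j => g j (l.getD j d))) ++ l.drop n := by
  intro n
  induction n with
  | zero => intro l h; simp
  | succ n ih =>
    intro l h
    rw [List.range_succ, List.foldl_append, List.map_append, ih l (by omega)]
    simp only [List.foldl_cons, List.foldl_nil, List.map_cons, List.map_nil]
    have hM : ((List.range n).map (fun j => g j (l.getD j d))).length = n := by simp
    have hget : (((List.range n).map (fun j => g j (l.getD j d))) ++ l.drop n).getD n d = l.getD n d := by
      rw [List.getD_eq_getElem?_getD, List.getElem?_append_right (by omega), hM]
      simp only [Nat.sub_self, List.getElem?_drop, Nat.add_zero]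
      rw [← List.getD_eq_getElem?_getD]
    rw [hget]
    rw [List.set_append_right _ _ (by omega), hM, Nat.sub_self]
    have hdrop : l.drop n = l.getD n d :: l.drop (n + 1) := by
      rw [List.drop_eq_getElem_cons (by omega), List.getD_eq_getElem]
    rw [hdrop]
    simp

-- One pass of the outer loop: A's inner byte loop versus B's one big-integer AND/OR
theorem step_eq (L : Nat) (nf key enc : List Nat)
    (hnf : nf.length = L) (hb₀ : ∀ b ∈ nf, b < 256)
    (hkey : 0 < L → key ≠ []) (henc : L ≤ enc.length)
    (hencB : ∀ b ∈ enc, b < 256) (hkB : ∀ b ∈ key, b < 256) :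
    ∃ nf' : List Nat,
      ((List.range L).foldl (fun pf j => pf.set j (Int.land (pf.getD j 0)
          (Int.lnot (Int.land (Int.lnot ((enc.getD j 0 : Nat) : Int))
            (Int.lnot ((key.getD (j % key.length) 0 : Nat) : Int)))))) (nf.map (fun b : Nat => (b : Int)))
        = nf'.map (fun b : Nat => (b : Int))) ∧
      nf'.length = L ∧ (∀ b ∈ nf', b < 256) ∧
      Nat.land (pyFromBytesBig nf)
        (Nat.lor (pyFromBytesBig (enc.take L))
          (pyFromBytesBig ((List.range L).map (fun j => key.getD (j % key.length) 0))))
        = pyFromBytesBig nf' := by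
  have h28 : (2:Nat) ^ 8 = 256 := rfl
  set ext := (List.range L).map (fun j => key.getD (j % key.length) 0) with hext_def
  set nf' := (List.range L).map
    (fun j => Nat.land (nf.getD j 0) (Nat.lor (enc.getD j 0) (key.getD (j % key.length) 0))) with hnf'_def
  have hnf'len : nf'.length = L := by simp [hnf'_def]
  have hextlen : ext.length = L := by simp [hext_def]
  have htakelen : (enc.take L).length = L := by
    simp [List.length_take, Nat.min_eq_left henc]
  have hextB : ∀ b ∈ ext, b < 256 := by
    intro b hb
    simp only [hext_def, List.mem_map, List.mem_range] at hb
    obtain ⟨j, hj, rfl⟩ := hb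
    have hk : key ≠ [] := hkey (by omega)
    have hkpos : 0 < key.length := List.length_pos_iff.mpr hk
    have hjk : j % key.length < key.length := Nat.mod_lt _ hkpos
    rw [List.getD_eq_getElem _ _ hjk]
    exact hkB _ (List.getElem_mem _)
  have htakeB : ∀ b ∈ enc.take L, b < 256 := fun b hb => hencB b (List.mem_of_mem_take hb)
  have hnf'B : ∀ b ∈ nf', b < 256 := by
    intro b hb
    simp only [hnf'_def, List.mem_map, List.mem_range] at hb
    obtain ⟨j, hj, rfl⟩ := hb
    have hjn : j < nf.length := by omega
    calc Nat.land (nf.getD j 0) _ ≤ nf.getD j 0 := Nat.and_le_left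
    _ < 256 := by rw [List.getD_eq_getElem _ _ hjn]; exact hb₀ _ (List.getElem_mem _)
  refine ⟨nf', ?_, hnf'len, hnf'B, ?_⟩
  · have H := foldl_set_range (fun j (v : Int) => Int.land v
      (Int.lnot (Int.land (Int.lnot ((enc.getD j 0 : Nat) : Int))
        (Int.lnot ((key.getD (j % key.length) 0 : Nat) : Int))))) 0 L
      (nf.map (fun b : Nat => (b : Int))) (by simp [hnf])
    rw [H, List.drop_eq_nil_of_le (by simp [hnf]), List.append_nil, hnf'_def, List.map_map]
    apply List.map_congr_left
    intro j hj
    have hjL : j < L := List.mem_range.mp hj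
    have hjn : j < nf.length := by omega
    have hget : (nf.map (fun b : Nat => (b : Int))).getD j 0 = ((nf.getD j 0 : Nat) : Int) := by
      rw [List.getD_eq_getElem _ _ (by simpa [hnf] using hjL), List.getElem_map,
        List.getD_eq_getElem _ _ hjn]
    rw [hget]
    exact int_step_eq _ _ _
  · have hzs : nf' = List.zipWith Nat.land nf (List.zipWith Nat.lor (enc.take L) ext) := by
      apply List.ext_getElem
      · simp [hnf'len, hnf, htakelen, hextlen]
      · intro i h1 h2
        have hiL : i < L := by omega
        have hin : i < nf.length := by omega
        simp only [hnf'_def, List.getElem_map, List.getElem_range, List.getElem_zipWith,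
          List.getElem_take, hext_def]
        rw [List.getD_eq_getElem _ _ hin, List.getD_eq_getElem _ _ (by omega : i < enc.length)]
    have hzsB : ∀ b ∈ List.zipWith Nat.lor (enc.take L) ext, b < 256 := by
      intro b hb
      obtain ⟨i, hi, rfl⟩ := List.mem_iff_getElem.mp hb
      rw [List.getElem_zipWith]
      rw [← h28]
      exact Nat.or_lt_two_pow (h28 ▸ htakeB _ (List.getElem_mem _)) (h28 ▸ hextB _ (List.getElem_mem _))
    have hzslen : (List.zipWith Nat.lor (enc.take L) ext).length = L := by
      simp [htakelen, hextlen]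
    rw [hzs, bytesToNat_zipWith_land nf _ (by rw [hnf, hzslen]) hb₀ hzsB,
      bytesToNat_zipWith_lor _ _ (by rw [htakelen, hextlen]) htakeB hextB]

-- The whole outer loop, abstracted over the parsed byte lists
theorem outer_loop (bK bE : List (List Nat)) (L : Nat)
    (hKB : ∀ lb ∈ bK, ∀ b ∈ lb, b < 256) (hEB : ∀ lb ∈ bE, ∀ b ∈ lb, b < 256) :
    ∀ n, n ≤ bK.length → n ≤ bE.length →
    (0 < L → ∀ i < n, bK.getD i [] ≠ []) → (∀ i < n, L ≤ (bE.getD i []).length) →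
    ∀ nf : List Nat, nf.length = L → (∀ b ∈ nf, b < 256) →
    ∃ nf' : List Nat, nf'.length = L ∧ (∀ b ∈ nf', b < 256) ∧
      ((List.range n).foldl (fun pf i =>
        (List.range L).foldl (fun pf j => pf.set j (Int.land (pf.getD j 0)
          (Int.lnot (Int.land (Int.lnot (((bE.getD i []).getD j 0 : Nat) : Int))
            (Int.lnot (((bK.getD i []).getD (j % (bK.getD i []).length) 0 : Nat) : Int)))))) pf)
        (nf.map (fun b : Nat => (b : Int))) = nf'.map (fun b : Nat => (b : Int))) ∧
      ((List.range n).foldl (fun acc i =>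
        Nat.land acc (Nat.lor (pyFromBytesBig ((bE.getD i []).take L))
          (pyFromBytesBig ((List.range L).map (fun j => (bK.getD i []).getD (j % (bK.getD i []).length) 0)))))
        (pyFromBytesBig nf) = pyFromBytesBig nf') := by
  intro n
  induction n with
  | zero =>
    intro _ _ _ _ nf hlen hB
    exact ⟨nf, hlen, hB, by simp, by simp⟩
  | succ n ih =>
    intro hK hE hKn hEn nf hlen hB
    obtain ⟨nf1, h1len, h1B, hA1, hB1⟩ :=
      ih (by omega) (by omega) (fun hL i hi => hKn hL i (by omega)) (fun i hi => hEn i (by omega)) nf hlen hB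
    have hKmem : ∀ b ∈ bK.getD n [], b < 256 := by
      intro b hb
      have hn : n < bK.length := by omega
      rw [List.getD_eq_getElem _ _ hn] at hb
      exact hKB _ (List.getElem_mem _) b hb
    have hEmem : ∀ b ∈ bE.getD n [], b < 256 := by
      intro b hb
      have hn : n < bE.length := by omega
      rw [List.getD_eq_getElem _ _ hn] at hb
      exact hEB _ (List.getElem_mem _) b hb
    obtain ⟨nf2, hA2, h2len, h2B, hB2⟩ :=
      step_eq L nf1 (bK.getD n []) (bE.getD n []) h1len h1B
        (fun hL => hKn hL n (by omega)) (hEn n (by omega)) hEmem hKmem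
    refine ⟨nf2, h2len, h2B, ?_, ?_⟩
    · rw [List.range_succ, List.foldl_append, hA1]
      simpa using hA2
    · rw [List.range_succ, List.foldl_append, hB1]
      simpa using hB2

theorem hexDigit_not_ws (c : Char) (h : (pyHexDigit? c).isSome) : pyHexWs c = false := by
  unfold pyHexDigit? at h
  split_ifs at h with h1 h2 h3
  · have : '0'.toNat ≤ c.toNat := Char_toNat_le_of_le h1.1
    have hv : ('0':Char).toNat = 48 := rfl
    simp only [pyHexWs, Bool.or_eq_false_iff, beq_eq_false_iff_ne]
    omega
  · have : 'a'.toNat ≤ c.toNat := Char_toNat_le_of_le h2.1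
    have hv : ('a':Char).toNat = 97 := rfl
    simp only [pyHexWs, Bool.or_eq_false_iff, beq_eq_false_iff_ne]
    omega
  · have : 'A'.toNat ≤ c.toNat := Char_toNat_le_of_le h3.1
    have hv : ('A':Char).toNat = 65 := rfl
    simp only [pyHexWs, Bool.or_eq_false_iff, beq_eq_false_iff_ne]
    omega
  · simp at h

theorem fromhex_isSome_iff : ∀ cs : List Char, (pyFromhexAux cs).isSome ↔
    ∀ t ∈ cs.splitOnP pyHexWs, t.length % 2 = 0 ∧ ∀ c ∈ t, (pyHexDigit? c).isSome := by
  intro cs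
  fun_induction pyFromhexAux cs with
  | case1 => simp [List.splitOnP_nil]
  | case2 c cs hws ih =>
    rw [List.splitOnP_cons, if_pos hws]
    simpa using ih
  | case3 c hnws =>
    rw [List.splitOnP_cons, if_neg (by simpa using hnws), List.splitOnP_nil]
    simp
  | case4 c hnws d cs' hv lv hdeq hceq ih =>
    have hdws : pyHexWs d = false := hexDigit_not_ws d (by simp [hdeq])
    rw [List.splitOnP_cons, if_neg (by simpa using hnws), List.splitOnP_cons, hdws, if_neg (by simp)]
    obtain ⟨h0, t0, hsplit⟩ := List.exists_cons_of_ne_nil (List.splitOnP_ne_nil pyHexWs cs')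
    rw [hsplit]
    rw [hsplit] at ih
    simp only [List.modifyHead_cons, Option.isSome_map]
    constructor
    · intro h t ht
      have hall := ih.mp h
      rcases List.mem_cons.mp ht with rfl | ht
      · have h0ok := hall h0 (by simp)
        refine ⟨?_, ?_⟩
        · have := h0ok.1
          simp only [List.length_cons]
          omega
        · intro x hx
          rcases List.mem_cons.mp hx with rfl | hx
          · simp [hceq]
          · rcases List.mem_cons.mp hx with rfl | hx
            · simp [hdeq]
            · exact h0ok.2 x hx
      · exact hall t (by simp [ht])
    · intro h
      apply ih.mpr
      intro t ht
      have hhead := h (c :: d :: h0) (by simp)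
      rcases List.mem_cons.mp ht with rfl | ht
      · refine ⟨?_, fun x hx => hhead.2 x (by simp [hx])⟩
        have := hhead.1
        simp only [List.length_cons] at this
        omega
      · exact h t (by simp [ht])
  | case5 c hnws d cs' hmatch =>
    rw [List.splitOnP_cons, if_neg (by simpa using hnws)]
    refine iff_of_false (by simp) ?_
    intro hall
    cases hd : pyHexWs d with
    | true =>
      rw [List.splitOnP_cons, if_pos hd] at hall
      simp only [List.modifyHead_cons] at hall
      have := (hall [c] (by simp)).1
      simp at this
    | false =>
      rw [List.splitOnP_cons, if_neg (by simp [hd])] at hall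
      obtain ⟨h0, t0, hsplit⟩ := List.exists_cons_of_ne_nil (List.splitOnP_ne_nil pyHexWs cs')
      rw [hsplit] at hall
      simp only [List.modifyHead_cons] at hall
      have hcd := hall (c :: d :: h0) (by simp)
      cases hc : pyHexDigit? c with
      | none =>
        have := hcd.2 c (by simp)
        rw [hc] at this
        simp at this
      | some x =>
        cases hdg : pyHexDigit? d with
        | none =>
          have := hcd.2 d (by simp)
          rw [hdg] at this
          simp at this
        | some y => exact hmatch x y hc hdg

theorem fromhex_length : ∀ (cs : List Char) (bs : List Nat), pyFromhexAux cs = some bs →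
    2 * bs.length = cs.countP (fun c => !pyHexWs c) := by
  intro cs
  fun_induction pyFromhexAux cs with
  | case1 => intro bs h; simp at h; subst h; simp
  | case2 c cs hws ih =>
    intro bs h
    rw [List.countP_cons, ih bs h]
    simp [hws]
  | case3 => intro bs h; simp at h
  | case4 c hnws d cs' hv lv hdeq hceq ih =>
    intro bs h
    simp only [Option.map_eq_some_iff] at h
    obtain ⟨bs', hbs', rfl⟩ := h
    have hdws : pyHexWs d = false := hexDigit_not_ws d (by simp [hdeq])
    have hcws : pyHexWs c = false := by simpa using hnws
    rw [List.countP_cons, List.countP_cons, ← ih bs' hbs']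
    simp [hcws, hdws]
    omega
  | case5 => intro bs h; simp at h

theorem pvHexOk_iff (s : String) : pvHexOk s ↔
    ∀ t ∈ s.toList.splitOnP pyHexWs, t.length % 2 = 0 ∧ ∀ c ∈ t, (pyHexDigit? c).isSome := by
  simp [pvHexOk, List.all_eq_true]

theorem parse_isSome_of_ok (s : String) (h : pvHexOk s) : (pyFromhex? s).isSome :=
  (fromhex_isSome_iff s.toList).mpr ((pvHexOk_iff s).mp h)

theorem parse_len_of_ok (s : String) (h : pvHexOk s) :
    ((pyFromhex? s).getD []).length = pvHexCount s := by
  obtain ⟨bs, hbs⟩ := Option.isSome_iff_exists.mp (parse_isSome_of_ok s h)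
  have := fromhex_length s.toList bs hbs
  rw [show pyFromhex? s = some bs from hbs]
  simp only [Option.getD_some, pvHexCount]
  omega

theorem getD_map_parse (keys : List String) (i : Nat) :
    (pyFromhex? (keys.getD i "")).getD [] =
      (keys.map (fun s => (pyFromhex? s).getD [])).getD i [] := by
  rcases Nat.lt_or_ge i keys.length with hi | hi
  · rw [List.getD_eq_getElem _ _ hi, List.getD_eq_getElem _ _ (by simpa using hi), List.getElem_map]
  · rw [List.getD_eq_default _ _ hi, List.getD_eq_default _ _ (by simpa using hi)]
    rfl

theorem parse_bytes_lt (s : String) (b : Nat) (hb : b ∈ (pyFromhex? s).getD []) : b < 256 := by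
  rcases h : pyFromhex? s with _ | bs
  · rw [h] at hb; simp at hb
  · rw [h] at hb
    exact fromhex_bytes_lt s.toList bs h b hb

-- ===== VERDICT (by name: the statement is the Claim_ definition above) =====
theorem decrypt_flag_spec : Claim_equal_decrypt_flag := by
  intro keys encs _ hpre
  obtain ⟨hkhex, hehex, hene, hlen, hrest⟩ := hpre
  unfold Spec_decrypt_flag
  cases encs with
  | nil => exact absurd rfl hene
  | cons e0 es =>
  simp only [decrypt_flag, decrypt_flag_alt, List.length_map]
  set bK := keys.map (fun s => (pyFromhex? s).getD []) with hbK
  set bE := (e0 :: es).map (fun s => (pyFromhex? s).getD []) with hbE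
  set L := (bE.headD []).length with hL
  have hKB : ∀ lb ∈ bK, ∀ b ∈ lb, b < 256 := by
    intro lb hlb b hb
    simp only [hbK, List.mem_map] at hlb
    obtain ⟨s, _, rfl⟩ := hlb
    exact parse_bytes_lt s b hb
  have hEB : ∀ lb ∈ bE, ∀ b ∈ lb, b < 256 := by
    intro lb hlb b hb
    simp only [hbE, List.mem_map] at hlb
    obtain ⟨s, _, rfl⟩ := hlb
    exact parse_bytes_lt s b hb
  have hLC : L = pvHexCount e0 := by
    rw [hL, show bE.headD [] = (pyFromhex? e0).getD [] from rfl,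
      parse_len_of_ok e0 (hehex e0 (by simp))]
  have hK0 : 0 < L → ∀ i < keys.length, bK.getD i [] ≠ [] := by
    intro hLpos i hi
    rw [hbK, ← getD_map_parse keys i]
    have hmem : keys.getD i "" ∈ keys := by
      rw [List.getD_eq_getElem _ _ hi]; exact List.getElem_mem _
    have hcnt := (hrest (hLC ▸ hLpos)).1 _ hmem
    have hlen2 := parse_len_of_ok _ (hkhex _ hmem)
    intro hnil
    rw [hnil] at hlen2
    simp only [List.length_nil] at hlen2
    omega
  have hE0 : ∀ i < keys.length, L ≤ (bE.getD i []).length := by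
    intro i hi
    rcases Nat.eq_zero_or_pos L with h0 | hLpos
    · omega
    · have hmem : (e0 :: es).getD i "" ∈ e0 :: es := by
        rw [List.getD_eq_getElem _ _ (Nat.lt_of_lt_of_le hi hlen)]
        exact List.getElem_mem _
      have h2 := (hrest (hLC ▸ hLpos)).2 i hi
      rw [hbE, ← getD_map_parse (e0 :: es) i, parse_len_of_ok _ (hehex _ hmem), hLC]
      exact h2
  obtain ⟨nf', hlen', hB', hA, hB⟩ :=
    outer_loop bK bE L hKB hEB keys.length (by simp [hbK]) (by simpa [hbE] using hlen)
      hK0 hE0 (List.replicate L 255) (by simp) (by intro b hb; simp [List.eq_of_mem_replicate hb])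
  have hinit : (List.replicate L (255:Int)) = (List.replicate L (255:Nat)).map (fun b : Nat => (b : Int)) := by
    simp
  rw [hinit, hA]
  have hacc0 : (2 ^ (8 * L) - 1 : Nat) = pyFromBytesBig (List.replicate L 255) :=
    (bytesToNat_replicate_255 L).symm
  have hBfold := hB
  rw [← hacc0] at hBfold
  have hBside : (List.range keys.length).foldl (fun acc i =>
      Nat.land acc (Nat.lor (pyFromBytesBig ((bE.getD i []).take L))
        (pyFromBytesBig ((List.range L).map
          (fun j => ((pyFromhex? (keys.getD i "")).getD []).getD
            (j % ((pyFromhex? (keys.getD i "")).getD []).length) 0)))))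
      (2 ^ (8 * L) - 1) = pyFromBytesBig nf' := by
    simpa only [getD_map_parse keys, ← hbK] using hBfold
  rw [hBside]
  rw [show L = nf'.length from hlen'.symm, toBytes_bytesToNat nf' hB']
  simp [List.map_map, Function.comp_def]
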